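-- pv_equiv track=rewrite | github.com/rohanmishra004/DSA_Amazon_SDE | arrays/replace0by5.py | replace0by5
-- ===== SOURCE A (Python) =====
-- def reverseUtil(temp):
--     rev = 0
--
--     while temp > 0:
--         digit = temp % 10
--         rev = rev*10+digit
--         temp = temp//10
--     return rev
--
-- def replace0by5(a):
--     if a == 0:
--         return 5
--
--     temp = 0
--
--     while a > 0:
--         digit = a % 10
--         if digit == 0:
--             digit = 5
--
--         temp = temp*10 + digit
--
--         a = a//10
--
--     return reverseUtil(temp)
-- ===== SOURCE B (Python) =====
-- def replace0by5(a):
--     if a == 0: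
--         return 5
--     result = 0
--     mult = 1
--     while a > 0:
--         digit = a % 10
--         if digit == 0:
--             digit = 5
--         result = result + digit * mult
--         mult = mult * 10
--         a = a // 10
--     return result
-- ===== Notes on version B (the rewrite author's own statement) =====
-- stated objective: simpler
-- what changed: Single forward pass accumulating digit*place-value instead of building a reversed number and re-reversing it with a second helper loop.
import Mathlib
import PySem

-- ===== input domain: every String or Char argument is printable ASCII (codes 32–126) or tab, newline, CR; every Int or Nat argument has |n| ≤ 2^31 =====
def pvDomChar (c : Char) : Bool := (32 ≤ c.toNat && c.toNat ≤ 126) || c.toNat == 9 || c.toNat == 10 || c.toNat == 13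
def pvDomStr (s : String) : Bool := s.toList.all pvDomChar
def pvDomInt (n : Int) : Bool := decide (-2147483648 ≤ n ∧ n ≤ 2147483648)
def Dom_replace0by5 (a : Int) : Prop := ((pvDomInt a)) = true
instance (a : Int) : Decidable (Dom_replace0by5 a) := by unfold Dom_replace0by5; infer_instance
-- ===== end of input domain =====

-- B replaces A's two-pass scheme (build the answer reversed, then re-reverse it with a helper
-- loop) by a single pass that accumulates digit*place-value directly; objective: simpler.

-- termination helper shared by the loops below (cited in decreasing_by)
theorem pvDiv10_toNat_lt (t : Int) (h : 0 < t) :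
    (PySem.Int.floordiv t 10).toNat < t.toNat := by
  rw [PySem.Int.floordiv_eq_ediv_of_pos (by norm_num)]; omega

-- ===== PORT A =====
-- while temp > 0: digit = temp % 10; rev = rev*10 + digit; temp = temp//10
def reverseUtilLoop (temp rev : Int) : Int :=
  if h : temp > 0 then
    reverseUtilLoop (PySem.Int.floordiv temp 10) (rev * 10 + PySem.Int.mod temp 10)
  else rev
termination_by temp.toNat
decreasing_by exact pvDiv10_toNat_lt temp h

def reverseUtil (temp : Int) : Int := reverseUtilLoop temp 0

-- while a > 0: digit = a % 10; if digit == 0: digit = 5; temp = temp*10 + digit; a = a//10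
def replace0by5Loop (a temp : Int) : Int :=
  if h : a > 0 then
    replace0by5Loop (PySem.Int.floordiv a 10)
      (temp * 10 + (if PySem.Int.mod a 10 = 0 then 5 else PySem.Int.mod a 10))
  else temp
termination_by a.toNat
decreasing_by exact pvDiv10_toNat_lt a h

def replace0by5 (a : Int) : Int :=
  if a = 0 then 5 else reverseUtil (replace0by5Loop a 0)

-- ===== PORT B =====
-- while a > 0: digit = a % 10; if digit == 0: digit = 5; result += digit*mult; mult *= 10; a //= 10
def replace0by5AltLoop (a result mult : Int) : Int :=
  if h : a > 0 then
    replace0by5AltLoop (PySem.Int.floordiv a 10)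
      (result + (if PySem.Int.mod a 10 = 0 then 5 else PySem.Int.mod a 10) * mult)
      (mult * 10)
  else result
termination_by a.toNat
decreasing_by exact pvDiv10_toNat_lt a h

def replace0by5_alt (a : Int) : Int :=
  if a = 0 then 5 else replace0by5AltLoop a 0 1

-- ===== PRECONDITION & SPEC =====
def Spec_replace0by5 (a : Int) (out : Int) : Prop := out = replace0by5_alt a
instance (a : Int) (out : Int) : Decidable (Spec_replace0by5 a out) := by unfold Spec_replace0by5; infer_instance

-- ===== CLAIM (what is proved, stated in full; the proofs are below) =====
def Claim_equal_replace0by5 : Prop := ∀ (a : Int), Dom_replace0by5 a → Spec_replace0by5 a (replace0by5 a)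

-- ===== LEMMAS AND PROOFS =====

-- number of iterations of reverseUtil's loop (= digit count of t)
def pvIters (t : Int) : Nat :=
  if h : t > 0 then pvIters (PySem.Int.floordiv t 10) + 1 else 0
termination_by t.toNat
decreasing_by exact pvDiv10_toNat_lt t h

theorem pvLoopStop (t : Int) (h : ¬ t > 0) (rev : Int) : reverseUtilLoop t rev = rev := by
  rw [reverseUtilLoop]; simp [h]

theorem pvItersStop (t : Int) (h : ¬ t > 0) : pvIters t = 0 := by
  rw [pvIters]; simp [h]

theorem pvShift (n : Nat) : ∀ t : Int, t.toNat ≤ n → ∀ rev : Int,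
    reverseUtilLoop t rev = rev * 10 ^ pvIters t + reverseUtilLoop t 0 := by
  induction n with
  | zero =>
    intro t ht rev
    have h : ¬ t > 0 := by omega
    rw [pvLoopStop t h, pvLoopStop t h, pvItersStop t h]; ring
  | succ n ih =>
    intro t ht rev
    by_cases h : t > 0
    · have hlt := pvDiv10_toNat_lt t h
      have hle : (PySem.Int.floordiv t 10).toNat ≤ n := by omega
      conv_lhs => rw [reverseUtilLoop]
      simp only [h, dite_true]
      rw [ih _ hle]
      conv_rhs => rw [pvIters, reverseUtilLoop]
      simp only [h, dite_true]
      rw [ih _ hle (0 * 10 + PySem.Int.mod t 10)]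
      ring
    · rw [pvLoopStop t h, pvLoopStop t h, pvItersStop t h]; ring

theorem pvAppendDigit (temp d : Int) (htemp : 0 ≤ temp) (hd1 : 1 ≤ d) (hd9 : d ≤ 9) :
    reverseUtilLoop (temp * 10 + d) 0 = d * 10 ^ pvIters temp + reverseUtilLoop temp 0 ∧
    pvIters (temp * 10 + d) = pvIters temp + 1 := by
  have hpos : temp * 10 + d > 0 := by nlinarith
  have hdiv : PySem.Int.floordiv (temp * 10 + d) 10 = temp := by
    rw [PySem.Int.floordiv_eq_ediv_of_pos (by norm_num)]; omega
  have hmod : PySem.Int.mod (temp * 10 + d) 10 = d := by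
    rw [PySem.Int.mod_eq_emod_of_pos (by norm_num)]; omega
  constructor
  · conv_lhs => rw [reverseUtilLoop]
    simp only [hpos, dite_true, hdiv, hmod]
    rw [pvShift temp.toNat temp le_rfl (0 * 10 + d)]
    ring
  · rw [pvIters]
    simp only [hpos, dite_true, hdiv]

theorem pvMain (n : Nat) : ∀ a : Int, a.toNat ≤ n → ∀ temp : Int, 0 ≤ temp →
    reverseUtilLoop (replace0by5Loop a temp) 0 =
      replace0by5AltLoop a (reverseUtilLoop temp 0) (10 ^ pvIters temp) := by
  induction n with
  | zero =>
    intro a ha temp htemp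
    have h : ¬ a > 0 := by omega
    rw [replace0by5Loop, replace0by5AltLoop]; simp [h]
  | succ n ih =>
    intro a ha temp htemp
    by_cases h : a > 0
    · have hlt := pvDiv10_toNat_lt a h
      have hle : (PySem.Int.floordiv a 10).toNat ≤ n := by omega
      have hm0 : 0 ≤ PySem.Int.mod a 10 := PySem.Int.mod_nonneg a (by norm_num)
      have hm9 : PySem.Int.mod a 10 < 10 := PySem.Int.mod_lt a (by norm_num)
      set d := if PySem.Int.mod a 10 = 0 then 5 else PySem.Int.mod a 10 with hddef
      have hd1 : 1 ≤ d := by rw [hddef]; split <;> omega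
      have hd9 : d ≤ 9 := by rw [hddef]; split <;> omega
      obtain ⟨hval, hit⟩ := pvAppendDigit temp d htemp hd1 hd9
      conv_lhs => rw [replace0by5Loop]
      simp only [h, dite_true, ← hddef]
      rw [ih _ hle _ (by nlinarith), hval, hit]
      conv_rhs => rw [replace0by5AltLoop]
      simp only [h, dite_true, ← hddef]
      rw [show d * 10 ^ pvIters temp + reverseUtilLoop temp 0
            = reverseUtilLoop temp 0 + d * 10 ^ pvIters temp from by ring,
          show (10:Int) ^ (pvIters temp + 1) = 10 ^ pvIters temp * 10 from by ring]
    · rw [replace0by5Loop, replace0by5AltLoop]; simp [h]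

-- ===== VERDICT (by name: the statement is the Claim_ definition above) =====
theorem replace0by5_spec : Claim_equal_replace0by5 := by
  intro a _
  unfold Spec_replace0by5 replace0by5 replace0by5_alt reverseUtil
  by_cases h : a = 0
  · simp [h]
  · simp only [h, if_false]
    have := pvMain a.toNat a le_rfl 0 le_rfl
    rw [this, pvLoopStop 0 (by omega) 0, pvItersStop 0 (by omega), pow_zero]
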